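-- pv_equiv track=rewrite | github.com/variasov/classic-db-tools | becnhes/conftest.py | tasks_rows
-- ===== SOURCE A (Python) =====
-- from itertools import cycle, chain, repeat
--
-- def tasks_rows(tasks_count: int):
--     return list(zip(
--         chain.from_iterable(
--             repeat(task_id, 3)
--             for task_id in range(tasks_count)
--         ),
--         cycle(
--             chain.from_iterable(
--                 repeat(task_name, 3)
--                 for task_name in ('First', 'Second', 'Third')
--             )
--         ),
--         range(3 * tasks_count),
--         cycle(('CREATED', 'STARTED', 'FINISHED')),
--     ))
-- ===== SOURCE B (Python) =====
-- def tasks_rows(tasks_count: int):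
--     names = ('First', 'Second', 'Third')
--     statuses = ('CREATED', 'STARTED', 'FINISHED')
--     return [(i // 3, names[(i // 3) % 3], i, statuses[i % 3])
--             for i in range(3 * tasks_count)]
-- ===== Notes on version B (the rewrite author's own statement) =====
-- stated objective: simpler
-- what changed: Replaces the four zipped lazy iterators (chain/repeat/cycle) with a single comprehension over one range of three times the count, computing every row directly by index arithmetic (quotient and remainder of the row index by three).
import Mathlib
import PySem

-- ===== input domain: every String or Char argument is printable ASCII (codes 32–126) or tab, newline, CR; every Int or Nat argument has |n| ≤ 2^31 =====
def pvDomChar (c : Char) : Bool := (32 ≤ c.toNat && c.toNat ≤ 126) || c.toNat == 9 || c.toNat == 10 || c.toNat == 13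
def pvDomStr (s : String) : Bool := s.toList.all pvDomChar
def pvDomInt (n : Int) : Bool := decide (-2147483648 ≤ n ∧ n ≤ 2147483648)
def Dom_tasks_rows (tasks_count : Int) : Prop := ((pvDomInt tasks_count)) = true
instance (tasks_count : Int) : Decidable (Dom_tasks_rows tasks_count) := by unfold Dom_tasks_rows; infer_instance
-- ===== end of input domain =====

-- B replaces A's four zipped lazy iterators (chain/repeat/cycle) with one comprehension
-- computing each row by index arithmetic — simpler decomposition, same O(n) cost.


-- ===== PORT A =====
-- zip of four streams; the two `cycle` streams are carried as (full list, remaining suffix),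
-- refilled from the full list when the suffix is exhausted; the zip stops with the finite columns.
def pvZip4 (c1 : List Int) (f2 c2 : List String) (c3 : List Int) (f4 c4 : List String) :
    List (Int × String × Int × String) :=
  match c1, c3 with
  | a :: as, i :: is =>
    match (if c2.isEmpty then f2 else c2), (if c4.isEmpty then f4 else c4) with
    | b :: bs, d :: ds => (a, b, i, d) :: pvZip4 as f2 bs is f4 ds
    | _, _ => []
  | _, _ => []

def tasks_rows (tasks_count : Int) : List (Int × String × Int × String) :=
  pvZip4
    ((PySem.List.pyRange 0 tasks_count 1).flatMap (fun task_id => List.replicate 3 task_id))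
    (["First", "Second", "Third"].flatMap (fun task_name => List.replicate 3 task_name))
    (["First", "Second", "Third"].flatMap (fun task_name => List.replicate 3 task_name))
    (PySem.List.pyRange 0 (3 * tasks_count) 1)
    ["CREATED", "STARTED", "FINISHED"]
    ["CREATED", "STARTED", "FINISHED"]

-- ===== PORT B =====
def tasks_rows_alt (tasks_count : Int) : List (Int × String × Int × String) :=
  (PySem.List.pyRange 0 (3 * tasks_count) 1).map (fun i =>
    (PySem.Int.floordiv i 3,
     PySem.List.pyGetD ["First", "Second", "Third"] (PySem.Int.mod (PySem.Int.floordiv i 3) 3) "",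
     i,
     PySem.List.pyGetD ["CREATED", "STARTED", "FINISHED"] (PySem.Int.mod i 3) ""))

-- ===== PRECONDITION & SPEC =====
def Spec_tasks_rows (tasks_count : Int) (out : List (Int × String × Int × String)) : Prop := out = tasks_rows_alt tasks_count
instance (tasks_count : Int) (out : List (Int × String × Int × String)) : Decidable (Spec_tasks_rows tasks_count out) := by unfold Spec_tasks_rows; infer_instance

-- ===== CLAIM (what is proved, stated in full; the proofs are below) =====
def Claim_equal_tasks_rows : Prop := ∀ (tasks_count : Int), Dom_tasks_rows tasks_count → Spec_tasks_rows tasks_count (tasks_rows tasks_count)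

-- ===== LEMMAS AND PROOFS =====

-- value of a cycle stream (full list f, current suffix c) at offset j from now
def pvCyc (f c : List String) (j : Nat) : String :=
  if j < c.length then c.getD j "" else f.getD ((j - c.length) % f.length) ""

theorem pvCyc_cons (f : List String) (b : String) (bs : List String) (j : Nat) :
    pvCyc f (b :: bs) (j + 1) = pvCyc f bs j := by
  simp [pvCyc, Nat.succ_sub_succ]

theorem pvCyc_nil (f : List String) (j : Nat) :
    pvCyc f [] j = pvCyc f f j := by
  unfold pvCyc
  by_cases h : j < f.length
  · simp [h, Nat.mod_eq_of_lt h]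
  · simp [h, Nat.mod_eq_sub_mod (Nat.le_of_not_lt h)]

theorem pvZip4_eq (c1 : List Int) : ∀ (c3 : List Int) (f2 c2 f4 c4 : List String),
    c1.length = c3.length → f2 ≠ [] → f4 ≠ [] →
    pvZip4 c1 f2 c2 c3 f4 c4 =
      (List.range c1.length).map
        (fun j => (c1.getD j 0, pvCyc f2 c2 j, c3.getD j 0, pvCyc f4 c4 j)) := by
  induction c1 with
  | nil => intro c3 f2 c2 f4 c4 h _ _; simp [pvZip4]
  | cons a as ih =>
    intro c3 f2 c2 f4 c4 hlen hf2 hf4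
    match c3, hlen with
    | i :: is, hlen =>
      -- case split on the two cycle suffixes
      rcases hc2 : (if c2.isEmpty then f2 else c2) with _ | ⟨b, bs⟩
      · exfalso
        by_cases h : c2.isEmpty
        · rw [if_pos h] at hc2; exact hf2 hc2
        · rw [if_neg h] at hc2; exact absurd hc2 (by simpa [List.isEmpty_iff] using h)
      rcases hc4 : (if c4.isEmpty then f4 else c4) with _ | ⟨d, ds⟩
      · exfalso
        by_cases h : c4.isEmpty
        · rw [if_pos h] at hc4; exact hf4 hc4
        · rw [if_neg h] at hc4; exact absurd hc4 (by simpa [List.isEmpty_iff] using h)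
      have hcyc2 : ∀ j, pvCyc f2 c2 j = pvCyc f2 (b :: bs) j := by
        intro j
        by_cases h : c2.isEmpty
        · rw [List.isEmpty_iff.mp h, pvCyc_nil]
          simp [h] at hc2; rw [hc2]
        · simp [h] at hc2; rw [hc2]
      have hcyc4 : ∀ j, pvCyc f4 c4 j = pvCyc f4 (d :: ds) j := by
        intro j
        by_cases h : c4.isEmpty
        · rw [List.isEmpty_iff.mp h, pvCyc_nil]
          simp [h] at hc4; rw [hc4]
        · simp [h] at hc4; rw [hc4]
      have hlen' : as.length = is.length := by simpa using hlen
      rw [show pvZip4 (a :: as) f2 c2 (i :: is) f4 c4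
            = (a, b, i, d) :: pvZip4 as f2 bs is f4 ds by
          rw [pvZip4]; rw [hc2, hc4]]
      rw [ih is f2 bs f4 ds hlen' hf2 hf4]
      rw [show (a :: as).length = as.length + 1 from rfl, List.range_succ_eq_map]
      simp only [List.map_cons, List.map_map]
      congr 1
      · rw [hcyc2 0, hcyc4 0]
        simp [pvCyc]
      · apply List.map_congr_left
        intro j _
        simp only [Function.comp_apply, Nat.succ_eq_add_one]
        rw [hcyc2 (j + 1), hcyc4 (j + 1), pvCyc_cons, pvCyc_cons]
        simp

theorem pvFlat_length (l : List Int) :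
    (l.flatMap (fun t => List.replicate 3 t)).length = 3 * l.length := by
  induction l with
  | nil => simp
  | cons a as ih => simp [List.flatMap_cons]; omega

theorem pvFlat_getD (l : List Int) : ∀ (j : Nat), j < 3 * l.length →
    (l.flatMap (fun t => List.replicate 3 t)).getD j 0 = l.getD (j / 3) 0 := by
  induction l with
  | nil => intro j hj; simp at hj
  | cons a as ih =>
    intro j hj
    match j with
    | 0 => rfl
    | 1 => rfl
    | 2 => rfl
    | (k + 3) =>
      have h1 : (a :: as).flatMap (fun t => List.replicate 3 t)
          = a :: a :: a :: as.flatMap (fun t => List.replicate 3 t) := by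
        simp [List.flatMap_cons, List.replicate]
      rw [h1]
      have h2 : (a :: a :: a :: as.flatMap (fun t => List.replicate 3 t)).getD (k + 3) 0
          = (as.flatMap (fun t => List.replicate 3 t)).getD k 0 := rfl
      rw [h2, ih k (by simp at hj; omega)]
      have h3 : (k + 3) / 3 = k / 3 + 1 := by omega
      rw [h3]
      rfl

-- ===== VERDICT (by name: the statement is the Claim_ definition above) =====
theorem tasks_rows_spec : Claim_equal_tasks_rows := by
  intro n _
  unfold Spec_tasks_rows tasks_rows tasks_rows_alt
  set c1 := (PySem.List.pyRange 0 n 1).flatMap (fun t => List.replicate 3 t) with hc1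
  set f2 := (["First", "Second", "Third"] : List String).flatMap (fun t => List.replicate 3 t) with hf2
  rw [pvZip4_eq c1 (PySem.List.pyRange 0 (3 * n) 1) f2 f2
        ["CREATED", "STARTED", "FINISHED"] ["CREATED", "STARTED", "FINISHED"]
        (by rw [hc1, pvFlat_length]
            simp [PySem.List.length_pyRange_one]; omega)
        (by decide) (by decide)]
  have hlen : c1.length = 3 * n.toNat := by
    rw [hc1, pvFlat_length]; simp [PySem.List.length_pyRange_one]
  rw [PySem.List.pyRange_one 0 (3 * n)]
  have h3n : (3 * n - 0).toNat = 3 * n.toNat := by omega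
  rw [h3n, List.map_map, hlen]
  apply List.map_congr_left
  intro j hj
  have hj' : j < 3 * n.toNat := List.mem_range.mp hj
  -- first component
  have e1 : c1.getD j 0 = ((j / 3 : Nat) : Int) := by
    rw [hc1, pvFlat_getD _ j (by simpa [PySem.List.length_pyRange_one] using hj')]
    have hjd : j / 3 < (PySem.List.pyRange 0 n 1).length := by
      simp [PySem.List.length_pyRange_one]; omega
    rw [List.getD_eq_getElem _ _ hjd, PySem.List.getElem_pyRange_one]
    simp
  have e2 : PySem.Int.floordiv ((0 : Int) + j) 3 = ((j / 3 : Nat) : Int) := by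
    simp
  have e3 : PySem.Int.mod ((j / 3 : Nat) : Int) 3 = ((j / 3 % 3 : Nat) : Int) := by
    simp
  have e4 : PySem.Int.mod ((0 : Int) + j) 3 = ((j % 3 : Nat) : Int) := by
    simp
  simp only [Function.comp, e2, e3, e4]
  rw [e1]
  simp only [PySem.List.pyGetD_natCast]
  -- names: f2.getD (j % 9) vs ["First","Second","Third"].getD (j/3 % 3)
  have hname : pvCyc f2 f2 j
      = (["First", "Second", "Third"] : List String).getD (j / 3 % 3) "" := by
    have hlen2 : f2.length = 9 := by decide
    have hcj : pvCyc f2 f2 j = f2.getD (j % 9) "" := by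
      unfold pvCyc
      by_cases h : j < f2.length
      · rw [if_pos h]
        rw [hlen2] at h
        rw [Nat.mod_eq_of_lt h]
      · rw [if_neg h]
        rw [hlen2] at h ⊢
        rw [Nat.mod_eq_sub_mod (Nat.le_of_not_lt h)]
    rw [hcj]
    have hdm : j / 3 % 3 = (j % 9) / 3 := by omega
    rw [hdm]
    have hk : j % 9 < 9 := Nat.mod_lt _ (by omega)
    set k := j % 9 with hkdef
    interval_cases k <;> rfl
  have hstat : pvCyc ["CREATED", "STARTED", "FINISHED"] ["CREATED", "STARTED", "FINISHED"] j
      = (["CREATED", "STARTED", "FINISHED"] : List String).getD (j % 3) "" := by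
    unfold pvCyc
    split
    · next h =>
      congr 1
      simp only [List.length_cons, List.length_nil] at h
      omega
    · next h =>
      congr 1
      simp only [List.length_cons, List.length_nil] at h ⊢
      omega
  rw [hname, hstat]
  -- last: range element value
  have hc3 : (List.map (fun k : Nat => (0 : Int) + k) (List.range (3 * n.toNat))).getD j 0
      = ((0 : Int) + j) := by
    rw [List.getD_eq_getElem _ _ (by simpa using hj')]
    simp
  rw [hc3]
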